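-- pv_equiv track=rewrite | github.com/natanhmc/4_semestre_ADS | Estrutura_de_Dados/Aula_14/AP2.py | f
-- ===== SOURCE A (Python) =====
-- def f(v, n):
--     if n == 0:
--         return 0
--     else:
--         s = f(v ,n-1)
--         if v[n-1] > 0:
--             s = s + v[n-1]
--         return s
-- ===== SOURCE B (Python) =====
-- def f(v, n):
--     s = 0
--     for i in range(n):
--         if v[i] > 0:
--             s = s + v[i]
--     return s
-- ===== Notes on version B (the rewrite author's own statement) =====
-- stated objective: simpler
-- what changed: Replaced the recursion on n by a single iterative accumulator loop over range(n).
-- crash fix: On n < 0 A raises RecursionError (infinite recursion) while B's empty range loop returns 0. — e.g. on f([], -1): A raises RecursionError, B returns 0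
import Mathlib
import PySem

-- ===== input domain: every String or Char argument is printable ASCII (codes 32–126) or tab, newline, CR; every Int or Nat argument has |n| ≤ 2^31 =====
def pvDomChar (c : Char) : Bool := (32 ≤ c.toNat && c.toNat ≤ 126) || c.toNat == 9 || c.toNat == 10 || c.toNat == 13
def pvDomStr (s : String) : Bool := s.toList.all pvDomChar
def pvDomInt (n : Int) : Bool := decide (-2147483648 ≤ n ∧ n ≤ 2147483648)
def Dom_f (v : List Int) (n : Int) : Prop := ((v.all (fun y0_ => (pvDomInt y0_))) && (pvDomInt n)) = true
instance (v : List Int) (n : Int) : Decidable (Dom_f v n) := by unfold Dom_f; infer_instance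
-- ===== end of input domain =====

-- B replaces A's recursion on n by an iterative accumulator loop over range(n) (simpler, O(1) space).

-- ===== PORT A =====
-- A recurses on n; the Nat fuel mirrors the recursion depth (for n < 0 Python never
-- terminates, so those inputs are outside Pre_f and the port's value there is irrelevant).
def fAux (v : List Int) : Nat → Int
  | 0 => 0
  | m + 1 =>
    let s := fAux v m
    if PySem.List.pyGetD v (m : Int) 0 > 0 then s + PySem.List.pyGetD v (m : Int) 0 else s

def f (v : List Int) (n : Int) : Int := fAux v n.toNat

-- ===== PORT B =====
def f_alt (v : List Int) (n : Int) : Int :=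
  (PySem.List.pyRange 0 n 1).foldl
    (fun s i => if PySem.List.pyGetD v i 0 > 0 then s + PySem.List.pyGetD v i 0 else s) 0

-- ===== PRECONDITION & SPEC =====
-- Pre_f: Python A returns normally only for 0 ≤ n ≤ len(v); n < 0 recurses forever
-- (RecursionError) and n > len(v) raises IndexError.
def Pre_f (v : List Int) (n : Int) : Prop := 0 ≤ n ∧ n ≤ v.length
instance (v : List Int) (n : Int) : Decidable (Pre_f v n) := by unfold Pre_f; infer_instance
def pvWitness_f : List Int × Int := ([3, -1, 2], 2)

-- On n < 0 A raises RecursionError (infinite recursion) while B's empty range loop returns 0.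
def Raises_f (v : List Int) (n : Int) : Prop := n < 0
instance (v : List Int) (n : Int) : Decidable (Raises_f v n) := by unfold Raises_f; infer_instance
def pvRaiseWitness_f : List Int × Int := ([], -1)
def pvRaiseWitnessOut_f : Int := 0

def Spec_f (v : List Int) (n : Int) (out : Int) : Prop := out = f_alt v n
instance (v : List Int) (n : Int) (out : Int) : Decidable (Spec_f v n out) := by unfold Spec_f; infer_instance

-- ===== CLAIM (what is proved, stated in full; the proofs are below) =====
def Claim_equal_f : Prop := ∀ (v : List Int) (n : Int), Dom_f v n → Pre_f v n → Spec_f v n (f v n)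
def Claim_raises_f : Prop := (∀ (v : List Int) (n : Int), Dom_f v n → Raises_f v n → ¬ Pre_f v n) ∧ (Dom_f (pvRaiseWitness_f.1) (pvRaiseWitness_f.2) ∧ Raises_f (pvRaiseWitness_f.1) (pvRaiseWitness_f.2) ∧ f_alt (pvRaiseWitness_f.1) (pvRaiseWitness_f.2) = pvRaiseWitnessOut_f)

-- ===== LEMMAS AND PROOFS =====
theorem fAux_eq_foldl (v : List Int) (m : Nat) :
    fAux v m = (PySem.List.pyRange 0 (m : Int) 1).foldl
      (fun s i => if PySem.List.pyGetD v i 0 > 0 then s + PySem.List.pyGetD v i 0 else s) 0 := by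
  induction m with
  | zero => simp [fAux, PySem.List.pyRange_one_eq_nil]
  | succ k ih =>
    rw [show ((k + 1 : Nat) : Int) = (k : Int) + 1 by push_cast; ring,
        PySem.List.pyRange_one_succ_right (by positivity), List.foldl_append]
    simp [fAux, ih]

-- ===== VERDICT (by name: the statement is the Claim_ definition above) =====
theorem f_spec : Claim_equal_f := by
  intro v n _ hPre
  unfold Spec_f f f_alt
  rw [← Int.toNat_of_nonneg hPre.1]
  exact fAux_eq_foldl v n.toNat

theorem f_raises : Claim_raises_f := by
  unfold Claim_raises_f
  refine ⟨fun v n _ hR hP => ?_, by decide⟩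
  unfold Raises_f at hR; unfold Pre_f at hP; omega

-- witness self-check: the recorded value pvRaiseWitnessOut_f is indeed what B's port returns at the raise witness
theorem pvRaiseWitnessOut_ok : f_alt pvRaiseWitness_f.1 pvRaiseWitness_f.2 = pvRaiseWitnessOut_f := f_raises.2.2.2
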